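-- pv_equiv track=rewrite | github.com/aniruddha2000/data-structures-algorithms | Leetcode/1323.py | maximum69Number
-- ===== SOURCE A (Python) =====
-- def maximum69Number(num: int) -> int:
--     num = [int(x) for x in str(num)]
--     for i, n in enumerate(num):
--         if n == 6:
--             num[i] = 9
--             break
--     s = [str(x) for x in num]
--     return int("".join(s))
-- ===== SOURCE B (Python) =====
-- def maximum69Number(num: int) -> int:
--     # Pure-arithmetic alternative: scan the digits of num with divmod from the
--     # least significant end, remembering the place value of the most
--     # significant digit 6; replacing that 6 by 9 adds 3 at that place.
--     best = 0
--     p = 1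
--     n = num
--     while n > 0:
--         if n % 10 == 6:
--             best = p
--         n //= 10
--         p *= 10
--     return num + 3 * best
-- ===== Notes on version B (the rewrite author's own statement) =====
-- stated objective: alternative
-- what changed: A converts str(num) into a list of int digits, scans it left-to-right to overwrite the first 6 with 9, then rebuilds the string and re-parses it with int(); B never touches strings: it scans the digits arithmetically with % 10 and // 10 from the least significant end, records the place value of the most significant 6, and returns num + 3 * that place value (replacing a 6 by a 9 adds exactly 3 at its place).
import Mathlib
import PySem

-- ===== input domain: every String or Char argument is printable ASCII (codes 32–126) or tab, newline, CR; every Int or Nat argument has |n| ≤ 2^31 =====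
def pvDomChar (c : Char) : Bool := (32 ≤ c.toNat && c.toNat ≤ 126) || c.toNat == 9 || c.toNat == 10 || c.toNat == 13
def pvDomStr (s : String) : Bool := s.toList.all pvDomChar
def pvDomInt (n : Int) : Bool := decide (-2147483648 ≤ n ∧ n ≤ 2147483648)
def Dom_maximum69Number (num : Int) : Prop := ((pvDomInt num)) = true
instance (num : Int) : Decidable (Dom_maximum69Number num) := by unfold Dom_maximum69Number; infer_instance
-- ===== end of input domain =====

-- B replaces A's string pipeline (parse str(num) into digits, overwrite the first 6, re-join and
-- re-parse with int()) by a pure-arithmetic digit scan with % 10 and // 10 that returns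
-- num + 3 * (place value of the most significant digit 6); objective: alternative.

-- ===== PORT A =====
-- int(s) ported BY HAND below (pvGo/pvDigitsVal?/pvIntOfChars?): an exact step-for-step clone of
-- PySem.Int.ofChars?'s algorithm (whitespace strip, sign, digits, '_' rule).  PySem's own internal
-- digit parser is a non-exposed private definition, so it cannot be reasoned about symbolically;
-- this clone is the same algorithm and agrees with Python's int() on every ASCII string.
def pvGo : List Char → Bool → Nat → Option Nat
  | [], afterDigit, acc => if afterDigit = true then some acc else none
  | c :: rest, afterDigit, acc =>
    if c.isDigit = true then pvGo rest true (acc * 10 + (c.toNat - '0'.toNat))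
    else
      if c = '_' ∧ afterDigit = true then
        match rest with
        | d :: _ => if d.isDigit = true then pvGo rest false acc else none
        | [] => none
      else none

def pvDigitsVal? : List Char → Option Nat
  | [] => none
  | cs => pvGo cs false 0

def pvIntOfChars? (s : List Char) : Option Int :=
  match (((s.dropWhile PySem.Int.isIntSpace).reverse).dropWhile PySem.Int.isIntSpace).reverse with
  | [] => (pvDigitsVal? []).map (fun a => (a : Int))
  | c :: ds =>
    if c = '-' then (pvDigitsVal? ds).map (fun a => -(a : Int))
    else if c = '+' then (pvDigitsVal? ds).map (fun a => (a : Int))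
    else (pvDigitsVal? (c :: ds)).map (fun a => (a : Int))

-- A's 'for i, n in enumerate(num): if n == 6: num[i] = 9; break' — replace the first 6, keep the rest
def pvRepA : List Int → List Int
  | [] => []
  | d :: t => if d = 6 then 9 :: t else d :: pvRepA t

-- 'int(x)' raises ValueError on a non-digit char (the '-' of a negative num): the parser returns
-- none there and the getD default is never the value claimed — those inputs are outside Pre_.
def maximum69Number (num : Int) : Int :=
  let digits := (PySem.Int.toChars num).map (fun c => (pvIntOfChars? [c]).getD 0)
  let digits' := pvRepA digits
  let s := digits'.map (fun d => PySem.Int.toChars d)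
  (pvIntOfChars? (PySem.Chars.join [] s)).getD 0

-- ===== PORT B =====
-- Source B's 'while n > 0' loop: state (n, p, best); best := p on each digit 6, so the final best is
-- the place value of the MOST significant 6 (0 if none)
def pvLoopB (n p best : Int) : Int :=
  if h : 0 < n then
    pvLoopB (PySem.Int.floordiv n 10) (p * 10) (if PySem.Int.mod n 10 = 6 then p else best)
  else best
termination_by n.toNat
decreasing_by
  have h10 : PySem.Int.floordiv n 10 = n / 10 := PySem.Int.floordiv_eq_ediv_of_pos (by omega)
  simp only [h10]
  omega

def maximum69Number_alt (num : Int) : Int := num + 3 * pvLoopB num 1 0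

-- ===== PRECONDITION & SPEC =====
-- A raises ValueError on every negative num (int('-') while converting str(num) char by char)
def Pre_maximum69Number (num : Int) : Prop := 0 ≤ num
instance (num : Int) : Decidable (Pre_maximum69Number num) := by unfold Pre_maximum69Number; infer_instance
def pvWitness_maximum69Number : Int := 9669

def Spec_maximum69Number (num : Int) (out : Int) : Prop := out = maximum69Number_alt num
instance (num : Int) (out : Int) : Decidable (Spec_maximum69Number num out) := by unfold Spec_maximum69Number; infer_instance

-- ===== CLAIM (what is proved, stated in full; the proofs are below) =====
def Claim_equal_maximum69Number : Prop := ∀ (num : Int), Dom_maximum69Number num → Pre_maximum69Number num → Spec_maximum69Number num (maximum69Number num)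

-- ===== LEMMAS AND PROOFS =====

-- big-endian digit values of a natural number (empty for 0)
def pvDigs : Nat → List Nat
  | 0 => []
  | m + 1 => pvDigs ((m + 1) / 10) ++ [(m + 1) % 10]
decreasing_by exact Nat.div_lt_self (Nat.succ_pos m) (by omega)

-- place value (1, 10, 100, …) of the most significant 6 of n; 0 if n has no digit 6
def pvB6 : Nat → Nat
  | 0 => 0
  | m + 1 =>
    if pvB6 ((m + 1) / 10) ≠ 0 then 10 * pvB6 ((m + 1) / 10)
    else if (m + 1) % 10 = 6 then 1 else 0
decreasing_by all_goals exact Nat.div_lt_self (Nat.succ_pos m) (by omega)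

-- value of a big-endian digit list
def pvVal (DS : List Nat) : Nat := DS.foldl (fun a d => a * 10 + d) 0

-- first-6 replacement on big-endian Nat digit lists (mirror of pvRepA)
def pvRep6 : List Nat → List Nat
  | [] => []
  | d :: t => if d = 6 then 9 :: t else d :: pvRep6 t

theorem pvDigs_pos (m : Nat) (h : 0 < m) : pvDigs m = pvDigs (m / 10) ++ [m % 10] := by
  cases m with
  | zero => omega
  | succ k => rw [pvDigs]

theorem pvB6_pos (m : Nat) (h : 0 < m) :
    pvB6 m = if pvB6 (m / 10) ≠ 0 then 10 * pvB6 (m / 10)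
             else if m % 10 = 6 then 1 else 0 := by
  cases m with
  | zero => omega
  | succ k => rw [pvB6]

theorem pvDigs_lt (m : Nat) : ∀ d ∈ pvDigs m, d < 10 := by
  induction m using pvDigs.induct with
  | case1 => simp [pvDigs]
  | case2 k ih =>
    rw [pvDigs]
    intro d hd
    rcases List.mem_append.mp hd with h | h
    · exact ih d h
    · simp at h; omega

theorem pvDigs_ne_nil (m : Nat) (h : 0 < m) : pvDigs m ≠ [] := by
  rw [pvDigs_pos m h]; simp

theorem pv_toDigitsCore (fuel : Nat) : ∀ (m : Nat) (ds : List Char), 0 < m → m ≤ fuel →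
    Nat.toDigitsCore 10 fuel m ds = (pvDigs m).map Nat.digitChar ++ ds := by
  induction fuel with
  | zero => intro m ds h1 h2; omega
  | succ f ih =>
    intro m ds h1 h2
    rw [Nat.toDigitsCore.eq_def]
    simp only []
    by_cases h : m / 10 = 0
    · rw [if_pos h, pvDigs_pos m h1, h]
      simp [pvDigs]
    · rw [if_neg h, ih (m / 10) _ (by omega) (by
        have := Nat.div_lt_self h1 (show 1 < 10 by omega); omega)]
      rw [pvDigs_pos m h1]
      simp

-- str(num) for 0 ≤ num is the big-endian digits rendered as chars ('0' alone for 0)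
theorem pv_toChars (num : Int) (h : 0 ≤ num) :
    PySem.Int.toChars num = (if num.toNat = 0 then [0] else pvDigs num.toNat).map Nat.digitChar := by
  rw [PySem.Int.toChars]
  rw [if_neg (by omega)]
  by_cases h0 : num.toNat = 0
  · rw [if_pos h0, h0]; rfl
  · rw [if_neg h0]
    show Nat.toDigitsCore 10 (num.toNat + 1) num.toNat [] = _
    rw [pv_toDigitsCore (num.toNat + 1) num.toNat [] (by omega) (by omega)]
    simp

-- single digit characters
theorem pv_char_parse (d : Nat) (h : d < 10) :
    (pvIntOfChars? [Nat.digitChar d]).getD 0 = (d : Int) := by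
  interval_cases d <;> decide

theorem pv_char_print (d : Nat) (h : d < 10) :
    PySem.Int.toChars ((d : Nat) : Int) = [Nat.digitChar d] := by
  interval_cases d <;> decide

theorem pv_char_not_space (d : Nat) (h : d < 10) :
    PySem.Int.isIntSpace (Nat.digitChar d) = false := by
  interval_cases d <;> decide

theorem pv_char_isDigit (d : Nat) (h : d < 10) :
    (Nat.digitChar d).isDigit = true := by
  interval_cases d <;> decide

theorem pv_char_toNat (d : Nat) (h : d < 10) :
    (Nat.digitChar d).toNat - '0'.toNat = d := by
  interval_cases d <;> decide

theorem pv_char_ne_minus (d : Nat) (h : d < 10) : Nat.digitChar d ≠ '-' := by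
  interval_cases d <;> decide

theorem pv_char_ne_plus (d : Nat) (h : d < 10) : Nat.digitChar d ≠ '+' := by
  interval_cases d <;> decide

-- dropWhile is the identity on lists with no int-space characters
theorem pv_dropWhile_id (l : List Char) (h : ∀ c ∈ l, PySem.Int.isIntSpace c = false) :
    l.dropWhile PySem.Int.isIntSpace = l := by
  cases l with
  | nil => rfl
  | cons c t => rw [List.dropWhile_cons_of_neg (by simp [h c (by simp)])]

-- the hand parser evaluates digit strings to their value
theorem pv_go_digits (DS : List Nat) (h : ∀ d ∈ DS, d < 10) :
    ∀ acc, pvGo (DS.map Nat.digitChar) true acc = some (DS.foldl (fun a d => a * 10 + d) acc) := by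
  induction DS with
  | nil => intro acc; rfl
  | cons d t ih =>
    intro acc
    have hd : d < 10 := h d (by simp)
    rw [List.map_cons, pvGo.eq_def]
    simp only []
    rw [if_pos (pv_char_isDigit d hd), pv_char_toNat d hd,
        ih (fun x hx => h x (by simp [hx]))]
    simp [List.foldl_cons]

theorem pv_parse_digits (DS : List Nat) (hne : DS ≠ []) (h : ∀ d ∈ DS, d < 10) :
    pvIntOfChars? (DS.map Nat.digitChar) = some ((pvVal DS : Nat) : Int) := by
  have hsp : ∀ c ∈ DS.map Nat.digitChar, PySem.Int.isIntSpace c = false := by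
    intro c hc
    rcases List.mem_map.mp hc with ⟨d, hd, rfl⟩
    exact pv_char_not_space d (h d hd)
  have hsp2 : ∀ c ∈ (DS.map Nat.digitChar).reverse, PySem.Int.isIntSpace c = false := by
    intro c hc; exact hsp c (List.mem_reverse.mp hc)
  rw [pvIntOfChars?]
  rw [pv_dropWhile_id _ hsp, pv_dropWhile_id _ hsp2, List.reverse_reverse]
  cases DS with
  | nil => exact absurd rfl hne
  | cons d t =>
    have hd : d < 10 := h d (by simp)
    rw [List.map_cons]
    simp only []
    rw [if_neg (pv_char_ne_minus d hd), if_neg (pv_char_ne_plus d hd)]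
    have : pvDigitsVal? (Nat.digitChar d :: t.map Nat.digitChar)
        = some ((d :: t).foldl (fun a x => a * 10 + x) 0) := by
      rw [pvDigitsVal?.eq_def]
      simp only []
      rw [pvGo.eq_def]
      simp only []
      rw [if_pos (pv_char_isDigit d hd), pv_char_toNat d hd]
      rw [pv_go_digits t (fun x hx => h x (by simp [hx]))]
      simp [List.foldl_cons]
    rw [this]
    rfl

-- value of a digit list
theorem pv_val_append (DS : List Nat) (d : Nat) :
    pvVal (DS ++ [d]) = 10 * pvVal DS + d := by
  simp [pvVal, List.foldl_append]; ring

theorem pv_val_digs (m : Nat) : pvVal (pvDigs m) = m := by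
  induction m using pvDigs.induct with
  | case1 => simp [pvDigs, pvVal]
  | case2 k ih =>
    rw [pvDigs, pv_val_append, ih]
    omega

-- B6 is nonzero exactly when a digit 6 occurs
theorem pv_b6_mem (m : Nat) : pvB6 m ≠ 0 ↔ 6 ∈ pvDigs m := by
  induction m using pvDigs.induct with
  | case1 => simp [pvB6, pvDigs]
  | case2 k ih =>
    rw [pvB6, pvDigs]
    by_cases h6 : pvB6 ((k + 1) / 10) ≠ 0
    · rw [if_pos h6]
      simp [List.mem_append, ih.mp h6]
      omega
    · rw [if_neg h6]
      have h0 : pvB6 ((k + 1) / 10) = 0 := by omega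
      have hnm : ¬ (6 ∈ pvDigs ((k + 1) / 10)) := fun hc => (ih.not.mp (by simp [h0])) hc
      by_cases hl : (k + 1) % 10 = 6
      · simp [hl, List.mem_append, hnm]
      · simp [hl, List.mem_append, hnm]
        omega

-- replacement distributes over appending the last digit
theorem pv_rep_append (DS : List Nat) (d : Nat) :
    pvRep6 (DS ++ [d]) = if 6 ∈ DS then pvRep6 DS ++ [d]
                         else DS ++ [if d = 6 then 9 else d] := by
  induction DS with
  | nil =>
    simp only [List.nil_append, List.not_mem_nil, if_false, pvRep6]
    split <;> simp_all
  | cons c t ih =>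
    by_cases hc : c = 6
    · subst hc; simp [pvRep6]
    · rw [List.cons_append, pvRep6, if_neg hc, ih]
      by_cases h6 : 6 ∈ t
      · rw [if_pos h6, if_pos (by simp [h6]), pvRep6, if_neg hc]
        rfl
      · have hmem : ¬ 6 ∈ c :: t := by
          simp only [List.mem_cons]
          rintro (h | h)
          · exact hc (Eq.symm h)
          · exact h6 h
        rw [if_neg h6, if_neg hmem]
        rfl

-- MAIN combinatorial fact: replacing the first 6 adds 3 at its place value
theorem pv_main (m : Nat) : pvVal (pvRep6 (pvDigs m)) = m + 3 * pvB6 m := by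
  induction m using pvDigs.induct with
  | case1 => simp [pvDigs, pvVal, pvRep6, pvB6]
  | case2 k ih =>
    rw [pvDigs, pv_rep_append, pvB6_pos (k + 1) (Nat.succ_pos k)]
    by_cases h6 : 6 ∈ pvDigs ((k + 1) / 10)
    · have hbne : pvB6 ((k + 1) / 10) ≠ 0 := (pv_b6_mem _).mpr h6
      rw [if_pos h6, if_pos hbne, pv_val_append, ih]
      omega
    · have hb0 : pvB6 ((k + 1) / 10) = 0 := by
        by_contra hb2
        exact h6 ((pv_b6_mem _).mp hb2)
      rw [if_neg h6,
          if_neg (show ¬(pvB6 ((k + 1) / 10) ≠ 0) from fun hn => hn hb0),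
          pv_val_append, pv_val_digs]
      by_cases hl : (k + 1) % 10 = 6
      · simp only [if_pos hl]
        omega
      · simp only [if_neg hl]
        omega

-- one unfolding of B's loop, with the Python // and % turned into Nat operations
theorem pv_stepB (k : Nat) (p best : Int) :
    pvLoopB ((k + 1 : Nat) : Int) p best
    = pvLoopB (((k + 1) / 10 : Nat) : Int) (p * 10) (if (k + 1) % 10 = 6 then p else best) := by
  rw [pvLoopB, dif_pos (by exact_mod_cast Nat.succ_pos k)]
  norm_num [PySem.Int.floordiv_natCast (k + 1) 10, PySem.Int.mod_natCast (k + 1) 10]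
  congr 1
  rw [if_congr (show ((↑k + 1) % 10 = (6 : Int)) ↔ ((k + 1) % 10 = 6) from by omega) rfl rfl]

-- bridge: B's Int loop computes pvB6 (times the entry value of p)
theorem pv_loopB (m : Nat) : ∀ (p best : Int),
    pvLoopB (m : Int) p best = if pvB6 m = 0 then best else (pvB6 m : Int) * p := by
  induction m using pvDigs.induct with
  | case1 => intro p best; rw [pvLoopB]; simp [pvB6]
  | case2 k ih =>
    intro p best
    rw [pv_stepB, ih, pvB6_pos (k + 1) (Nat.succ_pos k)]
    by_cases h6 : pvB6 ((k + 1) / 10) = 0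
    · rw [if_pos h6]
      by_cases hl : (k + 1) % 10 = 6
      · simp [h6, hl]
      · simp [h6, hl]
    · rw [if_neg h6]
      simp only [ne_eq, h6, not_false_eq_true, if_true]
      rw [if_neg (show ¬(10 * pvB6 ((k + 1) / 10) = 0) from by omega)]
      push_cast
      ring

-- char-level glue reused from the A pipeline
theorem pv_join_nil (l : List (List Char)) : PySem.Chars.join [] l = l.flatten := by
  induction l with
  | nil => rfl
  | cons x t ih =>
    simp only [PySem.Chars.join, List.intercalate] at *
    cases t <;> simp_all [List.intersperse]

theorem pv_flatten_singleton {α β : Type} (f : α → β) (l : List α) :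
    (l.map fun x => [f x]).flatten = l.map f := by
  induction l <;> simp_all

-- A's Int-level replacement tracks the Nat-level one
theorem pv_repA_ofNat (DS : List Nat) :
    pvRepA (DS.map (Nat.cast : Nat → Int)) = (pvRep6 DS).map (Nat.cast : Nat → Int) := by
  induction DS with
  | nil => rfl
  | cons d t ih =>
    by_cases hd : d = 6
    · subst hd; simp [pvRepA, pvRep6]
    · rw [List.map_cons, pvRepA, if_neg (fun hc => hd (by exact_mod_cast hc)),
          ih, pvRep6, if_neg hd, List.map_cons]

-- digits of pvRep6 stay below 10
theorem pv_rep_lt (DS : List Nat) (h : ∀ d ∈ DS, d < 10) : ∀ d ∈ pvRep6 DS, d < 10 := by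
  induction DS with
  | nil => simp [pvRep6]
  | cons c t ih =>
    rw [pvRep6]
    by_cases hc : c = 6
    · rw [if_pos hc]
      intro d hd
      rcases List.mem_cons.mp hd with rfl | hd
      · omega
      · exact h d (by simp [hd])
    · rw [if_neg hc]
      intro d hd
      rcases List.mem_cons.mp hd with rfl | hd
      · exact h d (by simp)
      · exact ih (fun x hx => h x (by simp [hx])) d hd

theorem pv_rep_ne_nil (DS : List Nat) (h : DS ≠ []) : pvRep6 DS ≠ [] := by
  cases DS with
  | nil => exact absurd rfl h
  | cons c t => rw [pvRep6]; split <;> simp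

-- A's whole pipeline, on the digit list of num
theorem pv_A_val (num : Int) (h : 0 ≤ num) :
    maximum69Number num
      = ((pvVal (pvRep6 (if num.toNat = 0 then [0] else pvDigs num.toNat)) : Nat) : Int) := by
  set DS : List Nat := if num.toNat = 0 then [0] else pvDigs num.toNat with hDS
  have hlt : ∀ d ∈ DS, d < 10 := by
    rw [hDS]; split
    · simp
    · exact pvDigs_lt num.toNat
  have hne : DS ≠ [] := by
    rw [hDS]; split
    · simp
    · exact pvDigs_ne_nil num.toNat (by omega)
  have hchars : PySem.Int.toChars num = DS.map Nat.digitChar := pv_toChars num h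
  unfold maximum69Number
  simp only [hchars, List.map_map]
  rw [List.map_congr_left
        (f := (fun c => (pvIntOfChars? [c]).getD 0) ∘ Nat.digitChar)
        (g := (Nat.cast : Nat → Int))
        (fun d hd => by simpa using pv_char_parse d (hlt d hd))]
  rw [pv_repA_ofNat, List.map_map]
  rw [List.map_congr_left
        (f := (fun d => PySem.Int.toChars d) ∘ (Nat.cast : Nat → Int))
        (g := fun d => [Nat.digitChar d])
        (fun d hd => by simpa using pv_char_print d (pv_rep_lt DS hlt d hd))]
  rw [pv_join_nil, pv_flatten_singleton]
  rw [pv_parse_digits (pvRep6 DS) (pv_rep_ne_nil DS hne) (pv_rep_lt DS hlt)]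
  rfl

-- ===== VERDICT (by name: the statement is the Claim_ definition above) =====
theorem maximum69Number_spec : Claim_equal_maximum69Number := by
  intro num _ hpre
  unfold Spec_maximum69Number maximum69Number_alt
  have hnn : 0 ≤ num := hpre
  obtain ⟨m, rfl⟩ : ∃ m : Nat, num = (m : Int) := ⟨num.toNat, by omega⟩
  rw [pv_A_val (m : Int) (Int.natCast_nonneg m), Int.toNat_natCast, pv_loopB m 1 0]
  by_cases h0 : m = 0
  · subst h0
    norm_num [pvB6, pvRep6, pvVal]
  · rw [if_neg h0, pv_main m]
    by_cases hb : pvB6 m = 0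
    · rw [if_pos hb, hb]
      push_cast
      ring
    · rw [if_neg hb]
      push_cast
      ring
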